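-- pv_equiv track=rewrite | github.com/rahulroynipon/problem_Solving | ProblemLOG.py | solved
-- ===== SOURCE A (Python) =====
-- def solved(n,s):
--     myDict = dict()
--     for i in s:
--         if i in myDict:
--             myDict[i] += 1
--         else:
--             myDict[i] = 1
--
--     solve = 0
--
--     for key,value in myDict.items():
--         if (ord(key)-64)<=value:
--             solve+=1
--
--     return solve
-- ===== SOURCE B (Python) =====
-- def solved(n, s):
--     t = sorted(s)
--     solve = 0
--     i = 0
--     while i < len(t):
--         j = i + 1
--         while j < len(t) and t[j] == t[i]:
--             j += 1
--         if ord(t[i]) - 64 <= j - i: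
--             solve += 1
--         i = j
--     return solve
-- ===== Notes on version B (the rewrite author's own statement) =====
-- stated objective: alternative
-- what changed: Replaces the hash-table frequency count with sort-then-scan: B sorts the string and walks it once, measuring each run of equal characters with an inner pointer and testing ord(c)-64 <= run length; no dictionary or frequency index is ever built.
import Mathlib
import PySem

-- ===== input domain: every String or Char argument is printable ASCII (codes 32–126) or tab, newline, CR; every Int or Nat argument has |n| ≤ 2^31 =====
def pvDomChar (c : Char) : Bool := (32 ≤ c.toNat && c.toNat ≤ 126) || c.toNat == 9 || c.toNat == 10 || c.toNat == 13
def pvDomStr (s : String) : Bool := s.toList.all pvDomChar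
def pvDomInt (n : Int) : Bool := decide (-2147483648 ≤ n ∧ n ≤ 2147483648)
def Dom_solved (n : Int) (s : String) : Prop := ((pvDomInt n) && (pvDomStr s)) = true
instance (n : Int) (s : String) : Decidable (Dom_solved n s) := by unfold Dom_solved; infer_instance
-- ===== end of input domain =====

-- B sorts the string and scans runs of equal characters; no frequency table is built.

-- ===== PORT A =====
def solved (n : Int) (s : String) : Int :=
  let myDict : PySem.Dict Char Int :=
    s.toList.foldl
      (fun d i => if d.contains i then d.insert i (d.getD i 0 + 1) else d.insert i 1)
      PySem.Dict.empty
  myDict.items.foldl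
    (fun solve kv => if ((kv.1.toNat : Int) - 64) ≤ kv.2 then solve + 1 else solve) 0

-- ===== PORT B =====
-- the outer while loop of Source B: at index i, the inner while advances j over the
-- run of characters equal to t[i] (takeWhile/dropWhile on the remainder), tests
-- ord(t[i]) - 64 <= j - i (run length), and continues from j.
def solvedRunScan : List Char → Int
  | [] => 0
  | c :: rest =>
      let run := rest.takeWhile (fun x => x == c)
      let rem := rest.dropWhile (fun x => x == c)
      (if ((c.toNat : Int) - 64) ≤ ((run.length + 1 : Nat) : Int) then 1 else 0)
        + solvedRunScan rem
termination_by t => t.length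
decreasing_by
  simpa using Nat.lt_succ_of_le (List.length_dropWhile_le _ _)

def solved_alt (n : Int) (s : String) : Int :=
  solvedRunScan (PySem.List.sorted s.toList (fun c => c) false)

-- ===== PRECONDITION & SPEC =====
def Spec_solved (n : Int) (s : String) (out : Int) : Prop := out = solved_alt n s
instance (n : Int) (s : String) (out : Int) : Decidable (Spec_solved n s out) := by unfold Spec_solved; infer_instance

-- ===== CLAIM (what is proved, stated in full; the proofs are below) =====
def Claim_equal_solved : Prop := ∀ (n : Int) (s : String), Dom_solved n s → Spec_solved n s (solved n s)

-- ===== LEMMAS AND PROOFS =====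

-- A's branching update step is exactly the Counter step.
theorem solved_step_eq :
    (fun (d : PySem.Dict Char Int) (i : Char) =>
      if d.contains i then d.insert i (d.getD i 0 + 1) else d.insert i 1) =
    (fun (d : PySem.Dict Char Int) (i : Char) => d.insert i (d.getD i 0 + 1)) := by
  funext d i
  by_cases h : d.contains i = true
  · simp [h]
  · rw [PySem.Dict.getD_of_not_contains (d := d) (k := i) (d0 := (0:Int)) (by simpa using h)]
    simp [h]

-- closed form of A: count the distinct characters satisfying the predicate.
theorem solved_closed (n : Int) (s : String) :
    solved n s =
      (((PySem.Set.ofList s.toList).countP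
        (fun c => decide (((c.toNat : Int) - 64) ≤ (s.toList.count c : Int)))) : Int) := by
  unfold solved
  rw [solved_step_eq, PySem.Dict.foldl_insert_getD_add_one_eq_counter]
  show List.foldl _ 0 (PySem.Dict.counter s.toList).items = _
  rw [PySem.Dict.items_counter, List.foldl_map]
  simp only []
  rw [PySem.List.foldl_ite_add_one
    (p := fun c => ((c.toNat : Int) - 64) ≤ (s.toList.count c : Int))]
  simp

-- in a sorted list, everything past the dropped run of the head differs from the head
theorem dropWhile_ne_of_sorted (c : Char) :
    ∀ (l : List Char), (∀ x ∈ l, c ≤ x) → l.Pairwise (· ≤ ·) →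
      ∀ x ∈ l.dropWhile (fun y => y == c), x ≠ c := by
  intro l
  induction l with
  | nil => intro _ _ x hx; simp at hx
  | cons a l ih =>
    intro hle hpw x hx
    by_cases ha : (a == c) = true
    · rw [List.dropWhile_cons, if_pos ha] at hx
      exact ih (fun y hy => hle y (List.mem_cons_of_mem _ hy)) hpw.of_cons x hx
    · rw [List.dropWhile_cons, if_neg ha] at hx
      have hac : a ≠ c := by simpa using ha
      have hca : c < a := lt_of_le_of_ne (hle a (List.mem_cons_self)) (Ne.symm hac)
      rcases List.mem_cons.mp hx with rfl | hx'
      · exact hac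
      · intro hxc
        subst hxc
        exact absurd (lt_of_lt_of_le hca ((List.pairwise_cons.mp hpw).1 x hx'))
          (lt_irrefl x)
  -- (proof structure: induction on l)

-- countP of a predicate over any two nodup lists with the same members agrees
theorem countP_eq_of_mem_iff {xs ys : List Char} (p : Char → Bool)
    (hx : xs.Nodup) (hy : ys.Nodup) (h : ∀ c, c ∈ xs ↔ c ∈ ys) :
    xs.countP p = ys.countP p :=
  ((List.perm_ext_iff_of_nodup hx hy).mpr h).countP_eq p

-- run scan on a sorted list counts distinct elements satisfying the count predicate
theorem solvedRunScan_eq_countP :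
    ∀ (t : List Char), t.Pairwise (· ≤ ·) →
      solvedRunScan t =
        ((t.dedup.countP
          (fun c => decide (((c.toNat : Int) - 64) ≤ (t.count c : Int)))) : Int) := by
  intro t
  induction t using solvedRunScan.induct with
  | case1 => intro _; simp [solvedRunScan]
  | case2 c rest rem ih =>
    intro hpw
    set run := rest.takeWhile (fun x => x == c) with hrundef
    have hremdef : rem = rest.dropWhile (fun x => x == c) := rfl
    have hle : ∀ x ∈ rest, c ≤ x := (List.pairwise_cons.mp hpw).1
    have hpw_rest : rest.Pairwise (· ≤ ·) := (List.pairwise_cons.mp hpw).2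
    have hsplit : run ++ rem = rest := by rw [hrundef, hremdef]; exact List.takeWhile_append_dropWhile
    have hrun : ∀ x ∈ run, x = c := by
      intro x hx
      have := List.mem_takeWhile_imp hx
      simpa using this
    have hne : ∀ x ∈ rem, x ≠ c := dropWhile_ne_of_sorted c rest hle hpw_rest
    have hcnotin : c ∉ rem := fun h => hne c h rfl
    have hpw_rem : rem.Pairwise (· ≤ ·) := hpw_rest.sublist (List.dropWhile_sublist _)
    -- counts
    have hcount_c : (c :: rest).count c = run.length + 1 := by
      rw [List.count_cons_self, ← hsplit, List.count_append,
        List.count_eq_length.mpr (fun b hb => (hrun b hb).symm),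
        List.count_eq_zero.mpr hcnotin]
    have hcount_d : ∀ d, d ≠ c → (c :: rest).count d = rem.count d := by
      intro d hd
      have h1 : (c :: rest).count d = rest.count d := by
        simp [Ne.symm hd]
      rw [h1, ← hsplit, List.count_append,
        List.count_eq_zero.mpr (fun h => hd (hrun d h)), Nat.zero_add]
    -- dedup replacement
    have hmem : ∀ x, x ∈ (c :: rest).dedup ↔ x ∈ c :: rem.dedup := by
      intro x
      simp only [List.mem_dedup, List.mem_cons, ← hsplit, List.mem_append]
      constructor
      · rintro (rfl | hx | hx)
        · exact Or.inl rfl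
        · exact Or.inl (hrun x hx)
        · exact Or.inr hx
      · rintro (rfl | hx)
        · exact Or.inl rfl
        · exact Or.inr (Or.inr hx)
    have hnodup : (c :: rem.dedup).Nodup := by
      refine List.nodup_cons.mpr ⟨fun h => hcnotin (List.mem_dedup.mp h), List.nodup_dedup _⟩
    set p : Char → Bool := fun d => decide (((d.toNat : Int) - 64) ≤ ((c :: rest).count d : Int)) with hp
    have hcp : (c :: rest).dedup.countP p = (c :: rem.dedup).countP p :=
      countP_eq_of_mem_iff p (List.nodup_dedup _) hnodup hmem
    have hcongr : rem.dedup.countP p =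
        rem.dedup.countP (fun d => decide (((d.toNat : Int) - 64) ≤ (rem.count d : Int))) := by
      apply List.countP_congr
      intro d hd
      have hdne : d ≠ c := hne d (List.mem_dedup.mp hd)
      simp [hp, hcount_d d hdne]
    have hpc : p c = decide (((c.toNat : Int) - 64) ≤ ((run.length + 1 : Nat) : Int)) := by
      simp [hp, hcount_c]
    rw [solvedRunScan]
    simp only [← hrundef, ← hremdef]
    rw [ih hpw_rem, hcp, List.countP_cons, hcongr, hpc]
    simp only [decide_eq_true_eq]
    push_cast
    split_ifs with h <;> ring

-- ===== VERDICT (by name: the statement is the Claim_ definition above) =====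
theorem solved_spec : Claim_equal_solved := by
  intro n s _
  unfold Spec_solved solved_alt
  rw [solved_closed]
  set l := s.toList
  set t := PySem.List.sorted l (fun c => c) false with ht
  have hperm : t.Perm l := PySem.List.sorted_perm l _ _
  have hpw : t.Pairwise (· ≤ ·) := PySem.List.sorted_pairwise l _
  rw [solvedRunScan_eq_countP t hpw]
  congr 1
  have hcnt : ∀ c, t.count c = l.count c := fun c => hperm.count_eq c
  calc (PySem.Set.ofList l).countP (fun c => decide (((c.toNat : Int) - 64) ≤ (l.count c : Int)))
      = t.dedup.countP (fun c => decide (((c.toNat : Int) - 64) ≤ (l.count c : Int))) := by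
        apply countP_eq_of_mem_iff _ (PySem.Set.nodup_ofList l) (List.nodup_dedup t)
        intro c
        rw [PySem.Set.mem_ofList, List.mem_dedup]
        exact ⟨fun h => hperm.mem_iff.mpr h, fun h => hperm.mem_iff.mp h⟩
    _ = t.dedup.countP (fun c => decide (((c.toNat : Int) - 64) ≤ (t.count c : Int))) := by
        apply List.countP_congr
        intro c _
        simp [hcnt c]
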